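-- pv_equiv track=rewrite | github.com/husensofteng/regDriver | regDriver.py | get_matching_cells_tracks_per_tumor
-- ===== SOURCE A (Python) =====
-- def get_matching_cells_tracks_per_tumor(list_of_cell_tracks, tumor_cells_dict):
--     tumor_cells_tracks_dict = {}
--     for tumor in tumor_cells_dict:
--         for cell_track in list_of_cell_tracks:
--             if cell_track.split('#')[0] in tumor_cells_dict[tumor]:
--                 if tumor not in tumor_cells_tracks_dict:
--                     tumor_cells_tracks_dict[tumor] = []
--                 tumor_cells_tracks_dict[tumor].append(cell_track)
--
--     return tumor_cells_tracks_dict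
-- ===== SOURCE B (Python) =====
-- def get_matching_cells_tracks_per_tumor(list_of_cell_tracks, tumor_cells_dict):
--     # inverted index: cell -> tumors whose cell list contains it (tumor order, deduped)
--     index = {}
--     for tumor, cells in tumor_cells_dict.items():
--         for cell in cells:
--             tumors = index.setdefault(cell, [])
--             if tumor not in tumors:
--                 tumors.append(tumor)
--     # one pass over the tracks
--     acc = {}
--     for cell_track in list_of_cell_tracks:
--         prefix = cell_track.split('#')[0]
--         for tumor in index.get(prefix, []):
--             acc.setdefault(tumor, []).append(cell_track)
--     # restore tumor-iteration key order
--     return {tumor: acc[tumor] for tumor in tumor_cells_dict if tumor in acc}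
-- ===== Notes on version B (the rewrite author's own statement) =====
-- stated objective: faster
-- what changed: A rescans the whole track list once per tumor (tumor x track nested scan with a dict lookup per comparison); B builds an inverted index cell->tumors once, makes a single pass over the tracks appending each track to its tumors' groups, and re-emits the groups in tumor order.
import Mathlib
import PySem

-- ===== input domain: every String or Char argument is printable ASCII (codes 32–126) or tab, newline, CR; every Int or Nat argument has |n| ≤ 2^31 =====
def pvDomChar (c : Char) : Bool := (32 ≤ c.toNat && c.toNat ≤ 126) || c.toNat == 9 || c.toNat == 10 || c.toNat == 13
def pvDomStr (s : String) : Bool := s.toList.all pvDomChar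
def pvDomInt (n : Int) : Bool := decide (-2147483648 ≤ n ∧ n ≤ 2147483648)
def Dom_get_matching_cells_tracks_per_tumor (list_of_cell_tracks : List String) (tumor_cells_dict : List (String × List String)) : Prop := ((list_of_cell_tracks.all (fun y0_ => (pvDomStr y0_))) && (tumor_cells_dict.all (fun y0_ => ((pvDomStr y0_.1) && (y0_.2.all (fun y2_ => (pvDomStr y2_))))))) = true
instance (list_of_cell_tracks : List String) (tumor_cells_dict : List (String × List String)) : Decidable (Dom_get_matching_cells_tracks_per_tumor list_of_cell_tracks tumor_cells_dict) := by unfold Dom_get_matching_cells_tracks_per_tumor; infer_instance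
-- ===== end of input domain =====

-- B replaces A's nested tumor×track rescan by an inverted index cell→tumors built once
-- plus a single pass over the tracks (objective: faster; measured).


-- cell_track.split('#')[0]  ('#' is a nonempty separator, so split? is some and the list nonempty)
def pvPrefix (s : String) : String := ((PySem.Str.split? s "#").getD []).headD ""

-- ===== PORT A =====
def get_matching_cells_tracks_per_tumor (list_of_cell_tracks : List String) (tumor_cells_dict : List (String × List String)) : List (String × List String) :=
  let tdict : PySem.Dict String (List String) := PySem.Dict.ofList tumor_cells_dict
  let res : PySem.Dict String (List String) :=
    tdict.items.foldl (fun acc p =>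
      list_of_cell_tracks.foldl (fun acc cell_track =>
        if (tdict.getD p.1 []).contains (pvPrefix cell_track) then
          -- 'if tumor not in dict: dict[tumor] = []' then 'dict[tumor].append(cell_track)'
          (if acc.contains p.1 then acc else acc.insert p.1 []).modify p.1 [] (· ++ [cell_track])
        else acc) acc)
      PySem.Dict.empty
  res.items

-- ===== PORT B =====
def get_matching_cells_tracks_per_tumor_alt (list_of_cell_tracks : List String) (tumor_cells_dict : List (String × List String)) : List (String × List String) :=
  let tdict : PySem.Dict String (List String) := PySem.Dict.ofList tumor_cells_dict
  -- inverted index cell -> tumors (tumor order, deduped); setdefault+conditional append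
  let index : PySem.Dict String (List String) :=
    tdict.items.foldl (fun idx p =>
      p.2.foldl (fun idx c =>
        let tumors := idx.getD c []
        if tumors.contains p.1 then idx else idx.insert c (tumors ++ [p.1])) idx)
      PySem.Dict.empty
  -- one pass over the tracks; acc.setdefault(tumor, []).append(cell_track)
  let acc : PySem.Dict String (List String) :=
    list_of_cell_tracks.foldl (fun acc cell_track =>
      (index.getD (pvPrefix cell_track) []).foldl (fun acc tumor =>
        acc.modify tumor [] (· ++ [cell_track])) acc)
      PySem.Dict.empty
  -- {tumor: acc[tumor] for tumor in tumor_cells_dict if tumor in acc}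
  let res : PySem.Dict String (List String) :=
    tdict.items.foldl (fun r p =>
      match acc.get? p.1 with
      | some l => r.insert p.1 l
      | none => r)
      PySem.Dict.empty
  res.items

-- ===== PRECONDITION & SPEC =====
def Spec_get_matching_cells_tracks_per_tumor (list_of_cell_tracks : List String) (tumor_cells_dict : List (String × List String)) (out : List (String × List String)) : Prop := out = get_matching_cells_tracks_per_tumor_alt list_of_cell_tracks tumor_cells_dict
instance (list_of_cell_tracks : List String) (tumor_cells_dict : List (String × List String)) (out : List (String × List String)) : Decidable (Spec_get_matching_cells_tracks_per_tumor list_of_cell_tracks tumor_cells_dict out) := by unfold Spec_get_matching_cells_tracks_per_tumor; infer_instance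

-- ===== CLAIM (what is proved, stated in full; the proofs are below) =====
def Claim_equal_get_matching_cells_tracks_per_tumor : Prop := ∀ (list_of_cell_tracks : List String) (tumor_cells_dict : List (String × List String)), Dom_get_matching_cells_tracks_per_tumor list_of_cell_tracks tumor_cells_dict → Spec_get_matching_cells_tracks_per_tumor list_of_cell_tracks tumor_cells_dict (get_matching_cells_tracks_per_tumor list_of_cell_tracks tumor_cells_dict)

-- ===== LEMMAS AND PROOFS =====

-- the tracks whose '#'-prefix occurs in the cell list cs
def pvMatch (tracks : List String) (cs : List String) : List String :=
  tracks.filter (fun tr => cs.contains (pvPrefix tr))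

-- A's inner loop body for a fixed tumor t with cell list cs
def pvStepA (t : String) (cs : List String) (a : PySem.Dict String (List String)) (tr : String) : PySem.Dict String (List String) :=
  if cs.contains (pvPrefix tr) then
    (if a.contains t then a else a.insert t []).modify t [] (· ++ [tr])
  else a

-- B's index-building inner loop body for a fixed tumor t
def pvStepI (t : String) (idx : PySem.Dict String (List String)) (c : String) : PySem.Dict String (List String) :=
  let tumors := idx.getD c []
  if tumors.contains t then idx else idx.insert c (tumors ++ [t])

lemma pvSet_add_idem (s : List String) (x : String) :
    PySem.Set.add (PySem.Set.add s x) x = PySem.Set.add s x := by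
  simp [PySem.Set.add]
  by_cases h : x ∈ s <;> simp [h]

lemma pvFind_fst {L : List (String × List String)} (hnd : (L.map Prod.fst).Nodup)
    {p : String × List String} (hp : p ∈ L) :
    L.find? (fun q => q.1 == p.1) = some p := by
  induction L with
  | nil => simp at hp
  | cons q0 L' ih =>
    simp only [List.map_cons, List.nodup_cons] at hnd
    rcases List.mem_cons.1 hp with h | h
    · subst h; simp [List.find?]
    · have hne : (q0.1 == p.1) = false := by
        simp only [beq_eq_false_iff_ne, ne_eq]
        intro he
        exact hnd.1 (he ▸ (List.mem_map.2 ⟨p, h, rfl⟩))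
      simp [List.find?, hne, ih hnd.2 h]

lemma pvA_inner_getD (tracks : List String) : ∀ (a : PySem.Dict String (List String)) (t : String) (cs : List String) (k : String),
    (tracks.foldl (pvStepA t cs) a).getD k [] =
      if k = t then a.getD t [] ++ pvMatch tracks cs else a.getD k [] := by
  induction tracks with
  | nil => intro a t cs k; by_cases hk : k = t <;> simp [hk, pvMatch]
  | cons tr tracks ih =>
    intro a t cs k
    simp only [List.foldl_cons]
    by_cases hm : pvPrefix tr ∈ cs
    · have hstep : pvStepA t cs a tr = (if a.contains t then a else a.insert t []).modify t [] (· ++ [tr]) := by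
        simp [pvStepA, List.contains_eq_mem, hm]
      rw [hstep, ih]
      have hmidt : ((if a.contains t then a else a.insert t []).modify t [] (· ++ [tr])).getD t [] = a.getD t [] ++ [tr] := by
        rw [PySem.Dict.getD_modify]
        by_cases hc : a.contains t
        · simp [hc]
        · simp [hc, PySem.Dict.getD_of_not_contains _ _ (by simpa using hc)]
      by_cases hk : k = t
      · subst hk
        simp [hmidt, pvMatch, List.contains_eq_mem, hm]
      · have hne : ((if a.contains t then a else a.insert t []).modify t [] (· ++ [tr])).getD k [] = a.getD k [] := by
          rw [PySem.Dict.getD_modify]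
          by_cases hc : a.contains t <;> simp [hk, hc, PySem.Dict.getD_insert]
        simp [hk, hne]
    · have hstep : pvStepA t cs a tr = a := by simp [pvStepA, List.contains_eq_mem, hm]
      rw [hstep, ih]
      by_cases hk : k = t <;> simp [hk, pvMatch, List.contains_eq_mem, hm]

lemma pvA_inner_keys (tracks : List String) : ∀ (a : PySem.Dict String (List String)) (t : String) (cs : List String),
    (tracks.foldl (pvStepA t cs) a).keys =
      if pvMatch tracks cs = [] then a.keys else PySem.Set.add a.keys t := by
  induction tracks with
  | nil => intro a t cs; simp [pvMatch]
  | cons tr tracks ih =>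
    intro a t cs
    simp only [List.foldl_cons]
    by_cases hm : pvPrefix tr ∈ cs
    · have hstep : pvStepA t cs a tr = (if a.contains t then a else a.insert t []).modify t [] (· ++ [tr]) := by
        simp [pvStepA, List.contains_eq_mem, hm]
      have hkeys : (pvStepA t cs a tr).keys = PySem.Set.add a.keys t := by
        rw [hstep, PySem.Dict.keys_modify]
        have hmem := PySem.Dict.contains_iff_mem_keys a t
        by_cases hc : a.contains t
        · rw [if_pos hc, PySem.Dict.keys_insert_of_contains _ _ hc]
          simp [PySem.Set.add, List.contains_eq_mem, hmem.1 hc]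
        · rw [if_neg (by simp [hc]),
              PySem.Dict.keys_insert_of_contains _ _ (PySem.Dict.contains_insert_self a t []),
              PySem.Dict.keys_insert_of_not_contains _ _ (by simpa using hc)]
          have : t ∉ a.keys := fun h => hc (hmem.2 h)
          simp [PySem.Set.add, List.contains_eq_mem, this]
      rw [ih]
      have hm' : ¬ (pvMatch (tr :: tracks) cs = []) := by
        simp [pvMatch, List.filter_cons, List.contains_eq_mem, hm]
      by_cases h2 : pvMatch tracks cs = []
      · simp [h2, hm', hkeys]
      · simp [h2, hm', hkeys, pvSet_add_idem]
    · have hstep : pvStepA t cs a tr = a := by simp [pvStepA, List.contains_eq_mem, hm]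
      rw [hstep, ih]
      have : pvMatch (tr :: tracks) cs = pvMatch tracks cs := by
        simp [pvMatch, List.filter_cons, List.contains_eq_mem, hm]
      rw [this]

lemma pvA_outer (tracks : List String) : ∀ (L : List (String × List String)) (a : PySem.Dict String (List String)),
    (L.map Prod.fst).Nodup → a.keys.Nodup → (∀ p ∈ L, a.contains p.1 = false) →
    (L.foldl (fun acc p => tracks.foldl (pvStepA p.1 p.2) acc) a).keys
        = a.keys ++ (L.filter (fun p => !(pvMatch tracks p.2).isEmpty)).map Prod.fst
      ∧ ∀ k, (L.foldl (fun acc p => tracks.foldl (pvStepA p.1 p.2) acc) a).getD k []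
        = match L.find? (fun q => q.1 == k) with
          | some p => a.getD k [] ++ pvMatch tracks p.2
          | none => a.getD k [] := by
  intro L
  induction L with
  | nil => intro a _ _ _; simp
  | cons p L' ih =>
    intro a hnd hka hfresh
    simp only [List.map_cons, List.nodup_cons] at hnd
    have hfp : a.contains p.1 = false := hfresh p (List.mem_cons_self)
    set a' := tracks.foldl (pvStepA p.1 p.2) a with ha'
    have hnotin : p.1 ∉ a.keys := fun h => by
      simp [(PySem.Dict.contains_iff_mem_keys a p.1).2 h] at hfp
    have hk' : a'.keys = if pvMatch tracks p.2 = [] then a.keys else a.keys ++ [p.1] := by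
      rw [ha', pvA_inner_keys]
      by_cases hm : pvMatch tracks p.2 = [] <;>
        simp [hm, PySem.Set.add, List.contains_eq_mem, hnotin]
    have hnodup' : a'.keys.Nodup := by
      rw [hk']
      by_cases hm : pvMatch tracks p.2 = []
      · simpa [hm] using hka
      · rw [if_neg hm]
        refine hka.append (List.nodup_singleton _) ?_
        intro x hx hy
        simp only [List.mem_singleton] at hy
        exact hnotin (hy ▸ hx)
    have hfresh' : ∀ q ∈ L', a'.contains q.1 = false := by
      intro q hq
      have hqa : a.contains q.1 = false := hfresh q (List.mem_cons_of_mem _ hq)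
      have hqp : q.1 ≠ p.1 := fun he => hnd.1 (he ▸ (List.mem_map.2 ⟨q, hq, rfl⟩))
      rw [← Bool.not_eq_true, PySem.Dict.contains_iff_mem_keys, hk']
      by_cases hm : pvMatch tracks p.2 = [] <;>
        simp [hm, hqp] <;>
        intro h <;> simp [(PySem.Dict.contains_iff_mem_keys a q.1).2 h] at hqa
    obtain ⟨ihk, ihg⟩ := ih a' hnd.2 hnodup' hfresh'
    constructor
    · rw [List.foldl_cons, ← ha', ihk, hk', List.filter_cons]
      by_cases hm : pvMatch tracks p.2 = [] <;> simp [hm]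
    · intro k
      rw [List.foldl_cons, ← ha', ihg k]
      by_cases hpk : p.1 = k
      · subst hpk
        have hfind : L'.find? (fun q => q.1 == p.1) = none := by
          rw [List.find?_eq_none]
          intro q hq
          simp only [beq_iff_eq]
          intro he
          exact hnd.1 (he ▸ (List.mem_map.2 ⟨q, hq, rfl⟩))
        have hgd : a'.getD p.1 [] = a.getD p.1 [] ++ pvMatch tracks p.2 := by
          rw [ha', pvA_inner_getD]; simp
        simp [List.find?, hfind, hgd]
      · have hgd : a'.getD k [] = a.getD k [] := by
          rw [ha', pvA_inner_getD]
          have hkp : ¬ k = p.1 := fun h => hpk h.symm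
          simp [hkp]
        rw [List.find?_cons_of_neg (by simpa using hpk), hgd]

lemma pvB_index_inner (cs : List String) (t : String) : ∀ (idx : PySem.Dict String (List String)) (c : String),
    (cs.foldl (pvStepI t) idx).getD c [] =
      if cs.contains c && !(idx.getD c []).contains t then idx.getD c [] ++ [t]
      else idx.getD c [] := by
  induction cs with
  | nil => intro idx c; simp
  | cons c0 cs ih =>
    intro idx c
    simp only [List.foldl_cons]
    by_cases h0 : t ∈ idx.getD c0 []
    · have hstep : pvStepI t idx c0 = idx := by simp [pvStepI, List.contains_eq_mem, h0]
      rw [hstep, ih]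
      by_cases hc : c = c0
      · subst hc
        simp [List.contains_eq_mem, h0]
      · have hc' : ¬ c0 = c := fun h => hc h.symm
        simp [List.contains_eq_mem, hc, hc']
    · have hstep : pvStepI t idx c0 = idx.insert c0 (idx.getD c0 [] ++ [t]) := by
        simp [pvStepI, List.contains_eq_mem, h0]
      rw [hstep, ih]
      by_cases hc : c = c0
      · subst hc
        simp [PySem.Dict.getD_insert, List.contains_eq_mem, h0]
      · have hc' : ¬ c0 = c := fun h => hc h.symm
        simp [PySem.Dict.getD_insert, List.contains_eq_mem, hc, hc']

lemma pvB_index_outer : ∀ (L : List (String × List String)) (idx : PySem.Dict String (List String)),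
    (L.map Prod.fst).Nodup → (∀ p ∈ L, ∀ c, (idx.getD c []).contains p.1 = false) →
    ∀ c, (L.foldl (fun idx p => p.2.foldl (pvStepI p.1) idx) idx).getD c []
      = idx.getD c [] ++ (L.filter (fun p => p.2.contains c)).map Prod.fst := by
  intro L
  induction L with
  | nil => intro idx _ _ c; simp
  | cons p L' ih =>
    intro idx hnd hfresh c
    simp only [List.map_cons, List.nodup_cons] at hnd
    set idx' := p.2.foldl (pvStepI p.1) idx with hidx'
    have hgd : ∀ c, idx'.getD c [] = idx.getD c [] ++ (if p.2.contains c then [p.1] else []) := by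
      intro c
      rw [hidx', pvB_index_inner]
      have hf := hfresh p List.mem_cons_self c
      have hf' : p.1 ∉ idx.getD c [] := by simpa [List.contains_eq_mem] using hf
      by_cases hm : c ∈ p.2 <;> simp [List.contains_eq_mem, hm, hf']
    have hfresh' : ∀ q ∈ L', ∀ c, (idx'.getD c []).contains q.1 = false := by
      intro q hq c
      have hqp : ¬ q.1 = p.1 := fun he => hnd.1 (he ▸ (List.mem_map.2 ⟨q, hq, rfl⟩))
      rw [hgd c]
      have hqi : q.1 ∉ idx.getD c [] := by
        simpa [List.contains_eq_mem] using hfresh q (List.mem_cons_of_mem _ hq) c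
      by_cases hm : c ∈ p.2 <;>
        simp [List.contains_eq_mem, hm, hqi, hqp]
    rw [List.foldl_cons, ← hidx', ih idx' hnd.2 hfresh', hgd c, List.filter_cons]
    by_cases hm : c ∈ p.2 <;> simp [List.contains_eq_mem, hm]

lemma pvB_acc_track (tr : String) : ∀ (ts : List String) (a : PySem.Dict String (List String)) (k : String), ts.Nodup →
    (ts.foldl (fun a t => a.modify t [] (· ++ [tr])) a).getD k []
      = a.getD k [] ++ (if ts.contains k then [tr] else []) := by
  intro ts
  induction ts with
  | nil => intro a k _; simp
  | cons t0 ts ih =>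
    intro a k hnd
    simp only [List.nodup_cons] at hnd
    rw [List.foldl_cons, ih _ k hnd.2]
    by_cases hk : k = t0
    · subst hk
      have h1 : (a.modify k [] (· ++ [tr])).getD k [] = a.getD k [] ++ [tr] := by
        rw [PySem.Dict.getD_modify]; simp
      have h2 : ts.contains k = false := by
        simp [List.contains_eq_mem, hnd.1]
      simp [h1, h2, List.contains_eq_mem, hnd.1]
    · have h1 : (a.modify t0 [] (· ++ [tr])).getD k [] = a.getD k [] := by
        rw [PySem.Dict.getD_modify]; simp [hk]
      have h2 : ¬ t0 = k := fun h => hk h.symm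
      simp [h1, List.contains_eq_mem, h2, hk]

lemma pvB_acc_track_contains (tr : String) (ts : List String) (a : PySem.Dict String (List String)) (k : String) :
    (ts.foldl (fun a t => a.modify t [] (· ++ [tr])) a).contains k
      = (a.contains k || ts.contains k) := by
  have hkeys := PySem.Dict.keys_foldl_modify ts ([] : List String) (fun _ _ v => v ++ [tr]) a
  rw [← Bool.coe_iff_coe]
  rw [PySem.Dict.contains_iff_mem_keys, hkeys, PySem.Set.mem_update]
  simp [PySem.Dict.contains_iff_mem_keys, List.contains_eq_mem]

lemma pvB_acc_getD (I : String → List String) (hI : ∀ c, (I c).Nodup) :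
    ∀ (tracks : List String) (a : PySem.Dict String (List String)) (k : String),
    (tracks.foldl (fun a tr => (I (pvPrefix tr)).foldl (fun a t => a.modify t [] (· ++ [tr])) a) a).getD k []
      = a.getD k [] ++ tracks.filter (fun tr => (I (pvPrefix tr)).contains k) := by
  intro tracks
  induction tracks with
  | nil => intro a k; simp
  | cons tr tracks ih =>
    intro a k
    rw [List.foldl_cons, ih, pvB_acc_track tr _ a k (hI _), List.filter_cons]
    by_cases hm : k ∈ I (pvPrefix tr) <;> simp [List.contains_eq_mem, hm]

lemma pvB_acc_contains (I : String → List String) :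
    ∀ (tracks : List String) (a : PySem.Dict String (List String)) (k : String),
    (tracks.foldl (fun a tr => (I (pvPrefix tr)).foldl (fun a t => a.modify t [] (· ++ [tr])) a) a).contains k
      = (a.contains k || !(tracks.filter (fun tr => (I (pvPrefix tr)).contains k)).isEmpty) := by
  intro tracks
  induction tracks with
  | nil => intro a k; simp
  | cons tr tracks ih =>
    intro a k
    rw [List.foldl_cons, ih, pvB_acc_track_contains tr _ a k, List.filter_cons]
    by_cases hm : k ∈ I (pvPrefix tr) <;> simp [List.contains_eq_mem, hm]

lemma pvB_final (acc : PySem.Dict String (List String)) :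
    ∀ (L : List (String × List String)) (r : PySem.Dict String (List String)),
    (L.map Prod.fst).Nodup → (∀ p ∈ L, r.contains p.1 = false) →
    (L.foldl (fun r p => match acc.get? p.1 with | some l => r.insert p.1 l | none => r) r).items
      = r.items ++ (L.filter (fun p => acc.contains p.1)).map (fun p => (p.1, acc.getD p.1 [])) := by
  intro L
  induction L with
  | nil => intro r _ _; simp
  | cons p L' ih =>
    intro r hnd hfresh
    simp only [List.map_cons, List.nodup_cons] at hnd
    have hfp : r.contains p.1 = false := hfresh p List.mem_cons_self
    rw [List.foldl_cons, List.filter_cons]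
    rcases hacc : acc.get? p.1 with _ | l
    · have hc : acc.contains p.1 = false := by
        rw [PySem.Dict.contains_eq_isSome_get?, hacc]; rfl
      rw [ih r hnd.2 (fun q hq => hfresh q (List.mem_cons_of_mem _ hq))]
      simp [hc]
    · have hc : acc.contains p.1 = true := by
        rw [PySem.Dict.contains_eq_isSome_get?, hacc]; rfl
      have hfresh' : ∀ q ∈ L', (r.insert p.1 l).contains q.1 = false := by
        intro q hq
        have hqp : ¬ q.1 = p.1 := fun he => hnd.1 (he ▸ (List.mem_map.2 ⟨q, hq, rfl⟩))
        rw [PySem.Dict.contains_insert]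
        simp [hqp, hfresh q (List.mem_cons_of_mem _ hq)]
      rw [ih (r.insert p.1 l) hnd.2 hfresh',
          PySem.Dict.items_insert_of_not_contains _ _ hfp]
      have hl : acc.getD p.1 [] = l := PySem.Dict.getD_of_get?_eq_some acc [] hacc
      simp [hc, hl]


-- ===== VERDICT (by name: the statement is the Claim_ definition above) =====
lemma pvMain (tracks : List String) (dict : List (String × List String)) :
    get_matching_cells_tracks_per_tumor tracks dict
      = get_matching_cells_tracks_per_tumor_alt tracks dict := by
  change
    (((PySem.Dict.ofList dict).items.foldl
        (fun acc p => tracks.foldl (pvStepA p.1 ((PySem.Dict.ofList dict).getD p.1 [])) acc)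
        PySem.Dict.empty).items)
    =
    (((PySem.Dict.ofList dict).items.foldl
        (fun r p =>
          match (tracks.foldl
              (fun acc cell_track =>
                ((((PySem.Dict.ofList dict).items.foldl
                    (fun idx p => p.2.foldl (pvStepI p.1) idx) PySem.Dict.empty).getD (pvPrefix cell_track) []).foldl
                  (fun acc tumor => acc.modify tumor [] (· ++ [cell_track])) acc))
              PySem.Dict.empty).get? p.1 with
          | some l => r.insert p.1 l
          | none => r)
        PySem.Dict.empty).items)
  set tdict : PySem.Dict String (List String) := PySem.Dict.ofList dict with htd
  set L := tdict.items with hL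
  have hknd : tdict.keys.Nodup := PySem.Dict.nodup_keys_ofList dict
  have hLnd : (L.map Prod.fst).Nodup := hknd
  -- ---- A side ----
  have hA0 :
      (L.foldl (fun acc p => tracks.foldl (pvStepA p.1 (tdict.getD p.1 [])) acc) PySem.Dict.empty)
      = L.foldl (fun acc p => tracks.foldl (pvStepA p.1 p.2) acc) PySem.Dict.empty := by
    apply PySem.List.foldl_congr_mem
    intro acc p hp
    have hg : tdict.getD p.1 [] = p.2 :=
      PySem.Dict.getD_of_mem_items tdict (by simpa using hp) hknd []
    rw [hg]
  rw [hA0]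
  set resA := L.foldl (fun acc p => tracks.foldl (pvStepA p.1 p.2) acc) PySem.Dict.empty with hres
  obtain ⟨hAk, hAg⟩ := pvA_outer tracks L PySem.Dict.empty hLnd (by simp) (by simp)
  rw [← hres] at hAk hAg
  set Lf := L.filter (fun p => !(pvMatch tracks p.2).isEmpty) with hLf
  have hAknd : resA.keys.Nodup := by
    rw [hAk]
    simpa using hLnd.sublist (List.Sublist.map Prod.fst List.filter_sublist)
  have hAitems : resA.items = Lf.map (fun p => (p.1, pvMatch tracks p.2)) := by
    rw [PySem.Dict.items_eq_map_keys resA hAknd [], hAk]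
    simp only [PySem.Dict.keys_empty, List.nil_append, List.map_map]
    apply List.map_congr_left
    intro p hp
    have hpL : p ∈ L := List.mem_of_mem_filter hp
    have hg := hAg p.1
    rw [pvFind_fst hLnd hpL] at hg
    simp only [PySem.Dict.getD_empty, List.nil_append] at hg
    simp only [Function.comp_apply, hg]
  -- ---- B side ----
  set index := L.foldl (fun idx p => p.2.foldl (pvStepI p.1) idx) PySem.Dict.empty with hidx
  have hindex : ∀ c, index.getD c [] = (L.filter (fun p => p.2.contains c)).map Prod.fst := by
    intro c
    rw [hidx, pvB_index_outer L PySem.Dict.empty hLnd (by simp)]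
    simp
  have hIndNodup : ∀ c, (index.getD c []).Nodup := by
    intro c
    rw [hindex]
    exact hLnd.sublist (List.Sublist.map Prod.fst List.filter_sublist)
  have hpt : ∀ p ∈ L, ∀ c, (index.getD c []).contains p.1 = p.2.contains c := by
    intro p hp c
    rw [hindex, ← Bool.coe_iff_coe]
    simp only [List.contains_eq_mem, decide_eq_true_eq, List.mem_map, List.mem_filter]
    constructor
    · rintro ⟨q, ⟨hqL, hqc⟩, hq1⟩
      have : q = p := List.inj_on_of_nodup_map hLnd hqL hp hq1
      subst this
      simpa using hqc
    · intro h
      exact ⟨p, ⟨hp, by simpa using h⟩, rfl⟩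
  set acc := tracks.foldl (fun acc cell_track =>
      (index.getD (pvPrefix cell_track) []).foldl (fun acc tumor =>
        acc.modify tumor [] (· ++ [cell_track])) acc) PySem.Dict.empty with hac
  have haccD : ∀ p ∈ L, acc.getD p.1 [] = pvMatch tracks p.2 := by
    intro p hp
    rw [hac, pvB_acc_getD (fun c => index.getD c []) hIndNodup tracks PySem.Dict.empty p.1]
    simp only [PySem.Dict.getD_empty, List.nil_append, pvMatch]
    apply List.filter_congr
    intro tr _
    exact hpt p hp (pvPrefix tr)
  have haccC : ∀ p ∈ L, acc.contains p.1 = !(pvMatch tracks p.2).isEmpty := by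
    intro p hp
    rw [hac, pvB_acc_contains (fun c => index.getD c []) tracks PySem.Dict.empty p.1]
    simp only [PySem.Dict.contains_empty, Bool.false_or, pvMatch]
    have hfe : tracks.filter (fun tr => (index.getD (pvPrefix tr) []).contains p.1)
        = tracks.filter (fun tr => p.2.contains (pvPrefix tr)) :=
      List.filter_congr (fun tr _ => hpt p hp (pvPrefix tr))
    rw [hfe]
  rw [hAitems, pvB_final acc L PySem.Dict.empty hLnd (by simp)]
  simp only [PySem.Dict.empty, List.nil_append]
  rw [List.filter_congr haccC]
  apply List.map_congr_left
  intro p hp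
  rw [haccD p (List.mem_of_mem_filter hp)]

-- ===== VERDICT (by name: the statement is the Claim_ definition above) =====
theorem get_matching_cells_tracks_per_tumor_spec : Claim_equal_get_matching_cells_tracks_per_tumor := by
  intro tracks dict _
  unfold Spec_get_matching_cells_tracks_per_tumor
  exact pvMain tracks dict
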